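-- pv_equiv track=rewrite | github.com/RenvezWilliam/NearWord | main.py | search_near_words
-- ===== SOURCE A (Python) =====
-- def search_near_words(word_list, word_to_search):
--     word_to_search = word_to_search.lower()
--     word_bank_0, word_bank_1, word_bank_2, word_bank_3 = [], [], [], []
--
--     for word in word_list:
--
--         count = sum(1 for a, b in zip(word, word_to_search) if a != b)
--         len_diff = abs(len(word) - len(word_to_search))
--         total = count + len_diff
--
--         match total:
--             case 0:
--                 word_bank_0.append(word)
--             case 1:
--                 word_bank_1.append(word)
--             case 2:
--                 word_bank_2.append(word)
--             case 3:
--                 word_bank_3.append(word)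
--             case _:
--                 continue
--
--     return word_bank_0, word_bank_1, word_bank_2, word_bank_3
-- ===== SOURCE B (Python) =====
-- def search_near_words(word_list, word_to_search):
--     t = word_to_search.lower()
--     totals = [(w, sum(1 for a, b in zip(w, t) if a != b) + abs(len(w) - len(t)))
--               for w in word_list]
--     return tuple([w for w, d in totals if d == i] for i in range(4))
-- ===== Notes on version B (the rewrite author's own statement) =====
-- stated objective: alternative
-- what changed: Replaces the single bucketing loop with match/case accumulators by a one-pass map building a (word, distance) table followed by four independent filter passes, one per bank.
import Mathlib
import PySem

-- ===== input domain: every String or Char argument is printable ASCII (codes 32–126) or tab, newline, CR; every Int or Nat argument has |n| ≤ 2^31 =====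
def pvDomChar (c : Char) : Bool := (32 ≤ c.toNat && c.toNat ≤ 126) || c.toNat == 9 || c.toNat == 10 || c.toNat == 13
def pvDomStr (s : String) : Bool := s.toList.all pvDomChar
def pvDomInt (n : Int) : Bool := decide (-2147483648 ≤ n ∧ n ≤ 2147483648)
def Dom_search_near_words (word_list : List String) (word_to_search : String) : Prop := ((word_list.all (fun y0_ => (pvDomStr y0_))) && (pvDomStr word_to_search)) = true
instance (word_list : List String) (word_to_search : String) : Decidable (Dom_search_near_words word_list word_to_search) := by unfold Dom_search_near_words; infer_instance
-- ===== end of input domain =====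

-- B replaces A's single bucketing loop (match/case on four accumulators) with a one-pass
-- (word, distance) table followed by four independent filter passes (objective: alternative).

-- shared distance: mismatch count over zip plus absolute length difference (both Pythons compute this expression)
def pvDist (w t : String) : Int :=
  ((w.toList.zip t.toList).countP (fun p => p.1 ≠ p.2) : Int)
    + |(w.toList.length : Int) - (t.toList.length : Int)|

-- ===== PORT A =====
def pvStepA (t : String)
    (banks : List String × List String × List String × List String) (w : String) :
    List String × List String × List String × List String :=
  let total := pvDist w t
  if total = 0 then (banks.1 ++ [w], banks.2.1, banks.2.2.1, banks.2.2.2)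
  else if total = 1 then (banks.1, banks.2.1 ++ [w], banks.2.2.1, banks.2.2.2)
  else if total = 2 then (banks.1, banks.2.1, banks.2.2.1 ++ [w], banks.2.2.2)
  else if total = 3 then (banks.1, banks.2.1, banks.2.2.1, banks.2.2.2 ++ [w])
  else banks

def search_near_words (word_list : List String) (word_to_search : String) :
    List String × List String × List String × List String :=
  let t := PySem.Str.lower word_to_search
  word_list.foldl (pvStepA t) ([], [], [], [])

-- ===== PORT B =====
def search_near_words_alt (word_list : List String) (word_to_search : String) :
    List String × List String × List String × List String :=
  let t := PySem.Str.lower word_to_search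
  let totals := word_list.map (fun w => (w, pvDist w t))
  ((totals.filter (fun p => p.2 = 0)).map Prod.fst,
   (totals.filter (fun p => p.2 = 1)).map Prod.fst,
   (totals.filter (fun p => p.2 = 2)).map Prod.fst,
   (totals.filter (fun p => p.2 = 3)).map Prod.fst)

-- ===== PRECONDITION & SPEC =====
def Spec_search_near_words (word_list : List String) (word_to_search : String) (out : List String × List String × List String × List String) : Prop := out = search_near_words_alt word_list word_to_search
instance (word_list : List String) (word_to_search : String) (out : List String × List String × List String × List String) : Decidable (Spec_search_near_words word_list word_to_search out) := by unfold Spec_search_near_words; infer_instance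

-- ===== CLAIM (what is proved, stated in full; the proofs are below) =====
def Claim_equal_search_near_words : Prop := ∀ (word_list : List String) (word_to_search : String), Dom_search_near_words word_list word_to_search → Spec_search_near_words word_list word_to_search (search_near_words word_list word_to_search)

-- ===== LEMMAS AND PROOFS =====

-- loop invariant: A's fold from any accumulators appends B's four filtered lists
theorem foldA_eq (t : String) (ws : List String)
    (b0 b1 b2 b3 : List String) :
    ws.foldl (pvStepA t) (b0, b1, b2, b3) =
      (b0 ++ ((ws.map (fun w => (w, pvDist w t))).filter (fun p => p.2 = 0)).map Prod.fst,
       b1 ++ ((ws.map (fun w => (w, pvDist w t))).filter (fun p => p.2 = 1)).map Prod.fst,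
       b2 ++ ((ws.map (fun w => (w, pvDist w t))).filter (fun p => p.2 = 2)).map Prod.fst,
       b3 ++ ((ws.map (fun w => (w, pvDist w t))).filter (fun p => p.2 = 3)).map Prod.fst) := by
  induction ws generalizing b0 b1 b2 b3 with
  | nil => simp
  | cons w ws ih =>
    simp only [List.foldl_cons, List.map_cons, List.filter_cons, pvStepA]
    by_cases h0 : pvDist w t = 0 <;> by_cases h1 : pvDist w t = 1 <;>
      by_cases h2 : pvDist w t = 2 <;> by_cases h3 : pvDist w t = 3 <;>
      simp_all

-- ===== VERDICT (by name: the statement is the Claim_ definition above) =====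
theorem search_near_words_spec : Claim_equal_search_near_words := by
  intro word_list word_to_search _
  unfold Spec_search_near_words search_near_words search_near_words_alt
  simp [foldA_eq]
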